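-- pv_equiv track=rewrite | github.com/Ely-S/PatientPunk | scripts/dump_drug_aliases.py | categorize_aliases
-- ===== SOURCE A (Python) =====
-- SHORT_ALIAS_THRESHOLD = 4  # aliases of this length or shorter are easy to
--
-- def categorize_aliases(canonical: str, aliases: list[str]) -> dict[str, list[str]]:
--     """Heuristic categorization for review. Pure presentation, not authoritative."""
--     short = [a for a in aliases if len(a) <= SHORT_ALIAS_THRESHOLD]
--     contains_canonical = [a for a in aliases if canonical.lower() in a.lower()]
--     likely_misspellings = [
--         a for a in aliases
--         if a not in contains_canonical
--         and not any(c.isspace() for c in a)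
--         and abs(len(a) - len(canonical)) <= 2
--         and a not in short
--     ]
--     multi_word = [a for a in aliases if " " in a or "-" in a or "/" in a]
--     return {
--         "short": short,
--         "multi_word": multi_word,
--         "likely_misspellings": likely_misspellings,
--     }
-- ===== SOURCE B (Python) =====
-- SHORT_ALIAS_THRESHOLD = 4
--
--
-- def categorize_aliases(canonical: str, aliases: list[str]) -> dict[str, list[str]]:
--     """Single pass: classify each alias by per-value booleans instead of
--     re-scanning intermediate lists."""
--     canon = canonical.lower()
--     short, multi_word, likely_misspellings = [], [], []
--     for a in aliases:
--         is_short = len(a) <= SHORT_ALIAS_THRESHOLD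
--         is_contained = canon in a.lower()
--         has_space = any(c.isspace() for c in a)
--         if is_short:
--             short.append(a)
--         if " " in a or "-" in a or "/" in a:
--             multi_word.append(a)
--         if (not is_contained and not has_space
--                 and abs(len(a) - len(canonical)) <= 2 and not is_short):
--             likely_misspellings.append(a)
--     return {
--         "short": short,
--         "multi_word": multi_word,
--         "likely_misspellings": likely_misspellings,
--     }
-- ===== Notes on version B (the rewrite author's own statement) =====
-- stated objective: faster
-- what changed: Replaces A's four separate list passes (one of which rescans the intermediate short/contains_canonical lists with O(n) 'not in' membership tests per alias) by a single loop that computes per-alias booleans and appends to the three result lists in one pass.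
import Mathlib
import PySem

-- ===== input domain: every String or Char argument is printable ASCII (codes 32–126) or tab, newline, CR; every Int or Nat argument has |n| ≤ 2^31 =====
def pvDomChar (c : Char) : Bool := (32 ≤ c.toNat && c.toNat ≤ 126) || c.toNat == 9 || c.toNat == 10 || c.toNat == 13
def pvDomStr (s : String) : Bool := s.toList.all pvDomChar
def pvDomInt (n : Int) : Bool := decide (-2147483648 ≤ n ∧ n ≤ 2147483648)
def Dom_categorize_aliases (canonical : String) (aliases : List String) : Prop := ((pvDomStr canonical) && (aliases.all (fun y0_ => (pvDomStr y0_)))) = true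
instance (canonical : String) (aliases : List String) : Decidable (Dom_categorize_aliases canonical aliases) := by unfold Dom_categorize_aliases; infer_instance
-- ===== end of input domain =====

-- B replaces A's four list passes (one with quadratic `a not in <list>` scans) by a single
-- classification pass computing per-alias booleans; objective: faster/simpler single pass.

-- ===== PORT A =====
def categorize_aliases (canonical : String) (aliases : List String) : List (String × List String) :=
  let short := aliases.filter (fun a => decide (PySem.Str.len a ≤ 4))
  let contains_canonical := aliases.filter (fun a =>
    PySem.Str.isIn (PySem.Str.lower canonical) (PySem.Str.lower a))
  let likely_misspellings := aliases.filter (fun a =>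
    !(contains_canonical.contains a)
    && !(a.toList.any PySem.Chars.isspace)
    && decide ((PySem.Str.len a - PySem.Str.len canonical).natAbs ≤ 2)
    && !(short.contains a))
  let multi_word := aliases.filter (fun a =>
    PySem.Str.isIn " " a || PySem.Str.isIn "-" a || PySem.Str.isIn "/" a)
  [("short", short), ("multi_word", multi_word), ("likely_misspellings", likely_misspellings)]

-- ===== PORT B =====
def categorize_aliases_alt (canonical : String) (aliases : List String) : List (String × List String) :=
  let canon := PySem.Str.lower canonical
  let st := aliases.foldl (fun (st : List String × List String × List String) a =>
    let is_short := decide (PySem.Str.len a ≤ 4)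
    let is_contained := PySem.Str.isIn canon (PySem.Str.lower a)
    let has_space := a.toList.any PySem.Chars.isspace
    let short := if is_short then st.1 ++ [a] else st.1
    let multi := if PySem.Str.isIn " " a || PySem.Str.isIn "-" a || PySem.Str.isIn "/" a
      then st.2.1 ++ [a] else st.2.1
    let mis := if !is_contained && !has_space
        && decide ((PySem.Str.len a - PySem.Str.len canonical).natAbs ≤ 2) && !is_short
      then st.2.2 ++ [a] else st.2.2
    (short, multi, mis)) ([], [], [])
  [("short", st.1), ("multi_word", st.2.1), ("likely_misspellings", st.2.2)]

-- ===== PRECONDITION & SPEC =====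
def Spec_categorize_aliases (canonical : String) (aliases : List String) (out : List (String × List String)) : Prop := out = categorize_aliases_alt canonical aliases
instance (canonical : String) (aliases : List String) (out : List (String × List String)) : Decidable (Spec_categorize_aliases canonical aliases out) := by unfold Spec_categorize_aliases; infer_instance

-- ===== CLAIM (what is proved, stated in full; the proofs are below) =====
def Claim_equal_categorize_aliases : Prop := ∀ (canonical : String) (aliases : List String), Dom_categorize_aliases canonical aliases → Spec_categorize_aliases canonical aliases (categorize_aliases canonical aliases)

-- ===== LEMMAS AND PROOFS =====

-- membership in a filtered sublist of `l`, for an element of `l`, is the filter test itself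
theorem contains_filter_of_mem {a : String} {l : List String} (p : String → Bool)
    (h : a ∈ l) : (l.filter p).contains a = p a := by
  rw [List.contains_eq_mem]
  by_cases hp : p a = true
  · simp [List.mem_filter, h, hp]
  · simp [List.mem_filter, hp]

-- ===== VERDICT (by name: the statement is the Claim_ definition above) =====
theorem categorize_aliases_spec : Claim_equal_categorize_aliases := by
  intro canonical aliases _
  show categorize_aliases canonical aliases = categorize_aliases_alt canonical aliases
  simp only [categorize_aliases, categorize_aliases_alt]
  rw [PySem.List.foldl_prod_mk
      (f := fun (x : List String) a => if decide (PySem.Str.len a ≤ 4) then x ++ [a] else x)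
      (g := fun (y : List String × List String) a =>
        (if PySem.Str.isIn " " a || PySem.Str.isIn "-" a || PySem.Str.isIn "/" a then y.1 ++ [a] else y.1,
         if !(PySem.Str.isIn (PySem.Str.lower canonical) (PySem.Str.lower a))
            && !(a.toList.any PySem.Chars.isspace)
            && decide ((PySem.Str.len a - PySem.Str.len canonical).natAbs ≤ 2)
            && !(decide (PySem.Str.len a ≤ 4)) then y.2 ++ [a] else y.2)),
    PySem.List.foldl_prod_mk
      (f := fun (x : List String) a =>
        if PySem.Str.isIn " " a || PySem.Str.isIn "-" a || PySem.Str.isIn "/" a then x ++ [a] else x)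
      (g := fun (x : List String) a =>
        if !(PySem.Str.isIn (PySem.Str.lower canonical) (PySem.Str.lower a))
            && !(a.toList.any PySem.Chars.isspace)
            && decide ((PySem.Str.len a - PySem.Str.len canonical).natAbs ≤ 2)
            && !(decide (PySem.Str.len a ≤ 4)) then x ++ [a] else x)]
  rw [PySem.List.foldl_append_if_eq_filter, PySem.List.foldl_append_if_eq_filter,
      PySem.List.foldl_append_if_eq_filter]
  simp only [List.nil_append, List.cons.injEq, Prod.mk.injEq, and_true, true_and]
  apply List.filter_congr
  intro a ha
  rw [contains_filter_of_mem _ ha, contains_filter_of_mem _ ha]
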